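-- pv_equiv track=rewrite | github.com/shhmon/Artificial-Intelligence-EDAP01 | assignment1/agent.py | evaluate
-- ===== SOURCE A (Python) =====
-- from itertools import groupby
--
-- def dup_count(seg):
--   notZero = lambda x: 0 not in x
--   groups = [list(group) for _, group in groupby(seg)]
--   lengths = [len(x) for x in filter(notZero, groups)]
--   return 0 if len(lengths) == 0 else max(lengths)
--
-- def evaluate(seq):
--     total = len(seq)-3
--     score = 0
--
--     for i in range(total):
--         seg = list(seq[i:i+4])
--         pos = seg.count(1)
--         neg = seg.count(-1)
--         _max = dup_count(seg) # Max duplicates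
--
--         if pos and not neg:
--           score += pos * _max + 1000 * int(pos == 4)
--         elif neg and not pos:
--           score -= neg * _max + 1000 * int(neg == 4)
--
--     return score
-- ===== SOURCE B (Python) =====
-- def evaluate(seq):
--     score = 0
--     for i in range(len(seq) - 3):
--         pos = neg = best = run = 0
--         prev = None
--         for x in seq[i:i+4]:
--             if x == 1:
--                 pos += 1
--             if x == -1:
--                 neg += 1
--             if x == 0:
--                 run = 0
--             elif prev is not None and x == prev:
--                 run += 1
--             else:
--                 run = 1
--             if run > best:
--                 best = run
--             prev = x
--         if pos and not neg:
--             score += pos * best + 1000 * (pos == 4)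
--         elif neg and not pos:
--             score -= neg * best + 1000 * (neg == 4)
--     return score
-- ===== Notes on version B (the rewrite author's own statement) =====
-- stated objective: alternative
-- what changed: Each length-4 window is evaluated in one incremental pass maintaining pos/neg counters and a current-run/best-run pair, instead of A's three separate scans per window (count(1), count(-1), and groupby-into-lists + filter + max).
import Mathlib
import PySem

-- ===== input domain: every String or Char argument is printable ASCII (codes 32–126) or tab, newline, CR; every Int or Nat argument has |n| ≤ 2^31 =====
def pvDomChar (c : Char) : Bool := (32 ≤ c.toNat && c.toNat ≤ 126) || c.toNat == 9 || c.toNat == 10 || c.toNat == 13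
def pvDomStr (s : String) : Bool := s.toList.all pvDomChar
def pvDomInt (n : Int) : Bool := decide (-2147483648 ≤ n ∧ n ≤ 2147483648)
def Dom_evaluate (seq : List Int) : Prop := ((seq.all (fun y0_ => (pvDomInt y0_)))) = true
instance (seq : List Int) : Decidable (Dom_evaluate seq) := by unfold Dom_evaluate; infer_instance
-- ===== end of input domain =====

-- B replaces A's three per-window scans (count(1), count(-1), groupby+filter+max) by one
-- incremental pass per window keeping counters and a current-run/best-run pair (objective: alternative).

-- ===== PORT A =====
-- itertools.groupby(seg): consecutive groups of equal elements, left to right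
def pyGroupbyGo (k : Int) (cur : List Int) : List Int → List (List Int)
  | [] => [cur.reverse]
  | y :: ys => if y = k then pyGroupbyGo k (y :: cur) ys else cur.reverse :: pyGroupbyGo y [y] ys

def pyGroupby : List Int → List (List Int)
  | [] => []
  | x :: xs => pyGroupbyGo x [x] xs

def dup_count (seg : List Int) : Int :=
  let groups := pyGroupby seg
  let lengths := (groups.filter (fun g => !(g.contains 0))).map (fun g => (g.length : Int))
  if lengths.length = 0 then 0 else (PySem.List.max? lengths (fun x => x)).getD 0

def evaluate (seq : List Int) : Int :=
  let total : Int := (seq.length : Int) - 3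
  (PySem.List.pyRange 0 total).foldl (fun score i =>
    let seg := PySem.List.slice seq (some i) (some (i + 4))
    let pos : Int := (PySem.List.count seg 1 : Int)
    let neg : Int := (PySem.List.count seg (-1) : Int)
    let m : Int := dup_count seg
    if pos ≠ 0 ∧ neg = 0 then score + (pos * m + 1000 * (if pos = 4 then 1 else 0))
    else if neg ≠ 0 ∧ pos = 0 then score - (neg * m + 1000 * (if neg = 4 then 1 else 0))
    else score) 0

-- ===== PORT B =====
-- one step of B's single pass over a window: state = (pos, neg, best, run, prev)
def bstep (st : Int × Int × Int × Int × Option Int) (x : Int) : Int × Int × Int × Int × Option Int :=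
  let pos := if x = 1 then st.1 + 1 else st.1
  let neg := if x = -1 then st.2.1 + 1 else st.2.1
  let run : Int := if x = 0 then 0 else if st.2.2.2.2 = some x then st.2.2.2.1 + 1 else 1
  let best := if st.2.2.1 < run then run else st.2.2.1
  (pos, neg, best, run, some x)

def evaluate_alt (seq : List Int) : Int :=
  (PySem.List.pyRange 0 ((seq.length : Int) - 3)).foldl (fun score i =>
    let st := (PySem.List.slice seq (some i) (some (i + 4))).foldl bstep (0, 0, 0, 0, none)
    let pos := st.1
    let neg := st.2.1
    let best := st.2.2.1
    if pos ≠ 0 ∧ neg = 0 then score + (pos * best + 1000 * (if pos = 4 then 1 else 0))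
    else if neg ≠ 0 ∧ pos = 0 then score - (neg * best + 1000 * (if neg = 4 then 1 else 0))
    else score) 0

-- ===== PRECONDITION & SPEC =====
def Spec_evaluate (seq : List Int) (out : Int) : Prop := out = evaluate_alt seq
instance (seq : List Int) (out : Int) : Decidable (Spec_evaluate seq out) := by unfold Spec_evaluate; infer_instance

-- ===== CLAIM (what is proved, stated in full; the proofs are below) =====
def Claim_equal_evaluate : Prop := ∀ (seq : List Int), Dom_evaluate seq → Spec_evaluate seq (evaluate seq)

-- ===== LEMMAS AND PROOFS =====

-- lengths of the groups not containing 0, exactly as dup_count builds them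
def lensNZ (gs : List (List Int)) : List Int :=
  (gs.filter (fun g => !(g.contains 0))).map (fun g => (g.length : Int))

lemma go_cons_eq (k : Int) (cur : List Int) (y : Int) (ys : List Int) (h : y = k) :
    pyGroupbyGo k cur (y :: ys) = pyGroupbyGo k (y :: cur) ys := by
  simp only [pyGroupbyGo]
  rw [if_pos h]

lemma go_cons_ne (k : Int) (cur : List Int) (y : Int) (ys : List Int) (h : ¬ y = k) :
    pyGroupbyGo k cur (y :: ys) = cur.reverse :: pyGroupbyGo y [y] ys := by
  simp only [pyGroupbyGo]
  rw [if_neg h]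

lemma lensNZ_cons_nz (g : List Int) (gs : List (List Int)) (hg : (0 : Int) ∉ g) :
    lensNZ (g :: gs) = (g.length : Int) :: lensNZ gs := by
  simp [lensNZ, List.filter_cons, hg]

lemma lensNZ_cons_z (g : List Int) (gs : List (List Int)) (hg : (0 : Int) ∈ g) :
    lensNZ (g :: gs) = lensNZ gs := by
  simp [lensNZ, List.filter_cons, hg]

lemma lensNZ_nil : lensNZ [] = [] := rfl

lemma init_le_foldl_max (L : List Int) : ∀ a : Int, a ≤ L.foldl max a := by
  induction L with
  | nil => intro a; simp
  | cons x L ih => intro a; exact le_trans (le_max_left a x) (ih (max a x))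

lemma notmem_rev (cur : List Int) (v : Int) (hv : v ≠ 0) (hcur : ∀ y ∈ cur, y = v) :
    (0 : Int) ∉ cur.reverse := by
  intro h
  exact hv ((hcur 0 (List.mem_reverse.mp h)).symm)

lemma foldl_max_pull (L : List Int) : ∀ (a b : Int), L.foldl max (max a b) = max a (L.foldl max b) := by
  induction L with
  | nil => intro a b; simp
  | cons x L ih =>
    intro a b
    simp only [List.foldl_cons]
    rw [max_assoc, ih]

lemma max_absorb (b x y : Int) (h : x ≤ b) : max b (max x y) = max b y := by
  simp only [max_def]; split_ifs <;> omega

lemma max_absorb2 (b r X : Int) (h : r ≤ X) : max (max b r) X = max b X := by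
  simp only [max_def]; split_ifs <;> omega

-- a leading all-zero context contributes nothing to the nonzero group lengths
lemma lensNZ_go_zero (l : List Int) : ∀ (zs : List Int), zs ≠ [] → (∀ y ∈ zs, y = 0) →
    lensNZ (pyGroupbyGo 0 zs l) = lensNZ (pyGroupby l) := by
  induction l with
  | nil =>
    intro zs hne hz
    have hmem : (0 : Int) ∈ zs.reverse := by
      cases zs with
      | nil => exact absurd rfl hne
      | cons a t =>
        have := hz a List.mem_cons_self
        subst this
        exact List.mem_reverse.mpr List.mem_cons_self
    rw [show pyGroupbyGo 0 zs [] = [zs.reverse] from rfl, lensNZ_cons_z _ _ hmem]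
    rfl
  | cons x xs ih =>
    intro zs hne hz
    by_cases hx : x = 0
    · subst hx
      rw [go_cons_eq 0 zs 0 xs rfl,
        ih (0 :: zs) (by simp) (by intro y hy; rcases List.mem_cons.mp hy with h | h; exact h; exact hz y h),
        show pyGroupby (0 :: xs) = pyGroupbyGo 0 [0] xs from rfl,
        ih [0] (by simp) (by intro y hy; simpa using hy)]
    · have hmem : (0 : Int) ∈ zs.reverse := by
        cases zs with
        | nil => exact absurd rfl hne
        | cons a t =>
          have := hz a List.mem_cons_self
          subst this
          exact List.mem_reverse.mpr List.mem_cons_self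
      rw [go_cons_ne 0 zs x xs hx, lensNZ_cons_z _ _ hmem,
        show pyGroupby (x :: xs) = pyGroupbyGo x [x] xs from rfl]
  
-- the current nonzero run appears among the nonzero group lengths
lemma lensNZ_go_first (l : List Int) : ∀ (v : Int) (cur : List Int), v ≠ 0 → cur ≠ [] →
    (∀ y ∈ cur, y = v) →
    (cur.length : Int) ≤ (lensNZ (pyGroupbyGo v cur l)).foldl max 0 := by
  induction l with
  | nil =>
    intro v cur hv hne hcur
    rw [show pyGroupbyGo v cur [] = [cur.reverse] from rfl,
      lensNZ_cons_nz _ _ (notmem_rev cur v hv hcur), lensNZ_nil, List.foldl_cons,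
      List.foldl_nil, List.length_reverse,
      max_eq_right (by omega : (0:Int) ≤ (cur.length : Int))]
  | cons x xs ih =>
    intro v cur hv hne hcur
    by_cases hxv : x = v
    · subst hxv
      rw [go_cons_eq x cur x xs rfl]
      have h := ih x (x :: cur) hv (by simp)
        (by intro y hy; rcases List.mem_cons.mp hy with h | h; exact h; exact hcur y h)
      simp only [List.length_cons] at h
      push_cast at h ⊢
      omega
    · rw [go_cons_ne v cur x xs hxv, lensNZ_cons_nz _ _ (notmem_rev cur v hv hcur),
        List.foldl_cons, List.length_reverse,
        max_eq_right (by omega : (0:Int) ≤ (cur.length : Int))]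
      exact init_le_foldl_max _ _

-- bstep with the best-update written as max
lemma bstep_eq (p n b r : Int) (pr : Option Int) (x : Int) :
    bstep (p, n, b, r, pr) x =
      (if x = 1 then p + 1 else p, if x = -1 then n + 1 else n,
        max b (if x = 0 then 0 else if pr = some x then r + 1 else 1),
        (if x = 0 then 0 else if pr = some x then r + 1 else 1), some x) := by
  simp only [bstep]
  have h : ∀ R : Int, (if b < R then R else b) = max b R := fun R => by
    rw [max_def]; split_ifs <;> omega
  rw [h]

-- the invariant of B's run scan, for both kinds of state:
-- a zero-ish state, and a state inside a nonzero run of value v and length cur.length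
lemma bfold_best (l : List Int) :
    (∀ (p n b : Int) (pr : Option Int), 0 ≤ b → (pr = none ∨ pr = some 0) →
      (List.foldl bstep (p, n, b, 0, pr) l).2.2.1 = max b ((lensNZ (pyGroupby l)).foldl max 0)) ∧
    (∀ (p n b v r : Int) (cur : List Int), v ≠ 0 → cur ≠ [] → (∀ y ∈ cur, y = v) →
      r = (cur.length : Int) → r ≤ b →
      (List.foldl bstep (p, n, b, r, some v) l).2.2.1 =
        max b ((lensNZ (pyGroupbyGo v cur l)).foldl max 0)) := by
  induction l with
  | nil =>
    constructor
    · intro p n b pr hb _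
      simp only [List.foldl_nil]
      rw [show pyGroupby [] = [] from rfl]
      simp only [lensNZ, List.filter_nil, List.map_nil, List.foldl_nil]
      exact (max_eq_left hb).symm
    · intro p n b v r cur hv hne hcur hr hlen
      simp only [List.foldl_nil]
      rw [show pyGroupbyGo v cur [] = [cur.reverse] from rfl,
        lensNZ_cons_nz _ _ (notmem_rev cur v hv hcur), lensNZ_nil, List.foldl_cons,
        List.foldl_nil, List.length_reverse,
        max_eq_right (by omega : (0:Int) ≤ (cur.length : Int))]
      exact (max_eq_left (hr ▸ hlen)).symm
  | cons x xs ih =>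
    constructor
    · intro p n b pr hb hpr
      by_cases hx : x = 0
      · subst hx
        rw [List.foldl_cons, bstep_eq, if_pos (rfl : (0:Int) = 0), max_eq_left hb,
          ih.1 _ _ b (some 0) hb (Or.inr rfl),
          show pyGroupby (0 :: xs) = pyGroupbyGo 0 [0] xs from rfl,
          lensNZ_go_zero xs [0] (by simp) (by intro y hy; simpa using hy)]
      · rw [List.foldl_cons, bstep_eq, if_neg hx]
        have hge := lensNZ_go_first xs x [x] hx (by simp) (by intro y hy; simpa using hy)
        simp only [List.length_cons, List.length_nil] at hge
        rcases hpr with rfl | rfl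
        · rw [if_neg (show ¬ (none : Option Int) = some x from fun h => by cases h),
            ih.2 _ _ (max b 1) x 1 [x] hx (by simp) (by intro y hy; simpa using hy) (by simp)
              (le_max_right b 1),
            show pyGroupby (x :: xs) = pyGroupbyGo x [x] xs from rfl]
          exact max_absorb2 b 1 _ (by push_cast at hge; omega)
        · rw [if_neg (fun h => hx (Option.some.inj h).symm),
            ih.2 _ _ (max b 1) x 1 [x] hx (by simp) (by intro y hy; simpa using hy) (by simp)
              (le_max_right b 1),
            show pyGroupby (x :: xs) = pyGroupbyGo x [x] xs from rfl]
          exact max_absorb2 b 1 _ (by push_cast at hge; omega)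
    · intro p n b v r cur hv hne hcur hr hlen
      subst hr
      have hlen1 : (1:Int) ≤ (cur.length : Int) := by
        cases cur with
        | nil => exact absurd rfl hne
        | cons a t => simp
      by_cases hxv : x = v
      · subst hxv
        have hcur' : ∀ y ∈ x :: cur, y = x := by
          intro y hy; rcases List.mem_cons.mp hy with h | h; exact h; exact hcur y h
        rw [List.foldl_cons, bstep_eq, if_neg hv, if_pos rfl,
          ih.2 _ _ (max b ((cur.length : Int) + 1)) x ((cur.length : Int) + 1) (x :: cur) hv
            (by simp) hcur' (by push_cast [List.length_cons]; ring) (le_max_right _ _),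
          go_cons_eq x cur x xs rfl]
        have hge := lensNZ_go_first xs x (x :: cur) hv (by simp) hcur'
        simp only [List.length_cons] at hge
        exact max_absorb2 b _ _ (by push_cast at hge ⊢; omega)
      · by_cases hx : x = 0
        · subst hx
          rw [List.foldl_cons, bstep_eq, if_pos (rfl : (0:Int) = 0),
            max_eq_left (by omega : (0:Int) ≤ b),
            ih.1 _ _ b (some 0) (by omega) (Or.inr rfl),
            go_cons_ne v cur 0 xs (fun h => hv h.symm),
            lensNZ_cons_nz _ _ (notmem_rev cur v hv hcur),
            lensNZ_go_zero xs [0] (by simp) (by intro y hy; simpa using hy),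
            List.foldl_cons, List.length_reverse,
            max_eq_right (by omega : (0:Int) ≤ (cur.length : Int)),
            show ((cur.length : Int)) = max ((cur.length : Int)) 0 from (max_eq_left (by omega)).symm,
            foldl_max_pull, max_absorb b _ _ hlen]
        · rw [List.foldl_cons, bstep_eq, if_neg hx,
            if_neg (fun h => hxv (Option.some.inj h).symm),
            ih.2 _ _ (max b 1) x 1 [x] hx (by simp) (by intro y hy; simpa using hy) (by simp)
              (le_max_right b 1),
            go_cons_ne v cur x xs hxv, lensNZ_cons_nz _ _ (notmem_rev cur v hv hcur),
            List.foldl_cons, List.length_reverse,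
            max_eq_right (by omega : (0:Int) ≤ (cur.length : Int)),
            show ((cur.length : Int)) = max ((cur.length : Int)) 0 from (max_eq_left (by omega)).symm,
            foldl_max_pull, max_absorb b _ _ hlen]
          have hge := lensNZ_go_first xs x [x] hx (by simp) (by intro y hy; simpa using hy)
          simp only [List.length_cons, List.length_nil] at hge
          exact max_absorb2 b 1 _ (by push_cast at hge; omega)

-- PySem.List.max? with identity key, once started, is foldl max
lemma max?_cons_val (rest : List Int) : ∀ (a : Int),
    (PySem.List.max? (a :: rest) (fun x => x)).getD 0 = rest.foldl max a := by
  induction rest with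
  | nil => intro a; simp [PySem.List.max?]
  | cons x rs ih =>
    intro a
    have h2 := ih (max a x)
    simp only [PySem.List.max?, List.foldl_cons] at h2 ⊢
    rw [show (if a < x then some x else some a) = some (max a x) from by
      rw [max_def]; split_ifs <;> simp only [Option.some.injEq] <;> omega]
    exact h2

-- dup_count is the foldl max over the nonzero group lengths
lemma dup_count_eq (l : List Int) : dup_count l = (lensNZ (pyGroupby l)).foldl max 0 := by
  have hd : dup_count l = if (lensNZ (pyGroupby l)).length = 0 then 0
      else (PySem.List.max? (lensNZ (pyGroupby l)) (fun x => x)).getD 0 := rfl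
  rw [hd]
  rcases e : lensNZ (pyGroupby l) with _ | ⟨a, rest⟩
  · simp
  · have ha : (0 : Int) ≤ a := by
      have hmem : a ∈ lensNZ (pyGroupby l) := by rw [e]; exact List.mem_cons_self
      have h' : ∃ g, (g ∈ pyGroupby l ∧ (0:Int) ∉ g) ∧ ((g.length : Int)) = a := by
        simpa [lensNZ] using hmem
      obtain ⟨g, -, hg⟩ := h'
      omega
    rw [if_neg (by simp), max?_cons_val rest a, List.foldl_cons, max_eq_right ha]

-- pos / neg counter projections of B's scan
lemma bfold_pos (l : List Int) : ∀ (p n b r : Int) (pr : Option Int),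
    (List.foldl bstep (p, n, b, r, pr) l).1 = p + (PySem.List.count l 1 : Int) := by
  induction l with
  | nil => intro p n b r pr; simp [PySem.List.count]
  | cons x xs ih =>
    intro p n b r pr
    rw [List.foldl_cons, bstep_eq, ih]
    by_cases hx : x = 1 <;> simp [PySem.List.count_eq, List.count_cons, hx] <;> push_cast <;> omega

lemma bfold_neg (l : List Int) : ∀ (p n b r : Int) (pr : Option Int),
    (List.foldl bstep (p, n, b, r, pr) l).2.1 = n + (PySem.List.count l (-1) : Int) := by
  induction l with
  | nil => intro p n b r pr; simp [PySem.List.count]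
  | cons x xs ih =>
    intro p n b r pr
    rw [List.foldl_cons, bstep_eq, ih]
    by_cases hx : x = -1 <;> simp [PySem.List.count_eq, List.count_cons, hx] <;> push_cast <;> omega

-- B's whole scan of one window agrees with A's three scans of it
lemma window_eq (seg : List Int) :
    (List.foldl bstep (0, 0, 0, 0, none) seg).1 = (PySem.List.count seg 1 : Int) ∧
    (List.foldl bstep (0, 0, 0, 0, none) seg).2.1 = (PySem.List.count seg (-1) : Int) ∧
    (List.foldl bstep (0, 0, 0, 0, none) seg).2.2.1 = dup_count seg := by
  refine ⟨by rw [bfold_pos]; ring, by rw [bfold_neg]; ring, ?_⟩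
  rw [(bfold_best seg).1 0 0 0 none le_rfl (Or.inl rfl), dup_count_eq]
  have h0 : (lensNZ (pyGroupby seg)).foldl max 0 =
      max 0 ((lensNZ (pyGroupby seg)).foldl max 0) := by
    conv_lhs => rw [show (0:Int) = max 0 0 from (max_self 0).symm, foldl_max_pull]
  exact h0.symm

-- ===== VERDICT (by name: the statement is the Claim_ definition above) =====
theorem evaluate_spec : Claim_equal_evaluate := by
  intro seq _
  unfold Spec_evaluate
  simp only [evaluate, evaluate_alt]
  apply PySem.List.foldl_congr_mem
  intro score i _
  obtain ⟨h1, h2, h3⟩ := window_eq (PySem.List.slice seq (some i) (some (i + 4)))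
  simp only [h1, h2, h3]
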